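-- pv_equiv track=rewrite | github.com/luiseduardoalencar/piam | pipelines/elgin/feature-impact.py | extract_base_feature_ohe
-- ===== SOURCE A (Python) =====
-- def extract_base_feature_ohe(
--     f: str,
--     bases_sorted: list[str],
--     feature_to_category: dict[str, str],
-- ) -> str:
--     for base in bases_sorted:
--         if f == base or f.startswith(base + "_"):
--             return base
--     if f in feature_to_category:
--         return f
--     return f  # fallback: retorna o próprio nome em vez de levantar erro
-- ===== SOURCE B (Python) =====
-- def extract_base_feature_ohe(
--     f: str,
--     bases_sorted: list[str],
--     feature_to_category: dict[str, str],
-- ) -> str: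
--     # Index each base by its first position, once.
--     idx = {}
--     for i, b in enumerate(bases_sorted):
--         if b not in idx:
--             idx[b] = i
--     # A base matches f exactly when it is f itself or an underscore-cut prefix of f.
--     candidates = [f] + [f[:i] for i, ch in enumerate(f) if ch == "_"]
--     hits = [idx[c] for c in candidates if c in idx]
--     return bases_sorted[min(hits)] if hits else f
-- ===== Notes on version B (the rewrite author's own statement) =====
-- stated objective: alternative
-- what changed: Instead of scanning the bases and prefix-testing f against each, B builds a base-to-first-index map once, looks up only f and its underscore-cut prefixes, and returns the base with the minimal index.
import Mathlib
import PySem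

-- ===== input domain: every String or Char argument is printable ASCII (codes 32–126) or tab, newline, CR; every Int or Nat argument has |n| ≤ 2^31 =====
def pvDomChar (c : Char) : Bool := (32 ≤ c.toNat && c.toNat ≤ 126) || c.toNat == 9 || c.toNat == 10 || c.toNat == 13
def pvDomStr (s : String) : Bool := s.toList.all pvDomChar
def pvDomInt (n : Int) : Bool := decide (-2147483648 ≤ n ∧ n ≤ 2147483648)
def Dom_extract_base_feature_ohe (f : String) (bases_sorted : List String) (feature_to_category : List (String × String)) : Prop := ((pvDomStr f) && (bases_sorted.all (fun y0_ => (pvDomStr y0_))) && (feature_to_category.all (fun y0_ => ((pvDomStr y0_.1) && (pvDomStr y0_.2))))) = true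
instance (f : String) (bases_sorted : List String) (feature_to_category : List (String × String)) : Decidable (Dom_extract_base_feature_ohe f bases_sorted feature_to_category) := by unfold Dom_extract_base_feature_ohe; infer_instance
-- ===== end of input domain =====

-- B replaces A's scan of all bases with per-base prefix tests by a base→first-index map built once,
-- looking up only f and its underscore-prefixes and taking the minimal index (objective: alternative algorithm).


-- ===== PORT A =====
-- the 'for base in bases_sorted: … return base' loop
def pvFindBase (f : String) : List String → Option String
  | [] => none
  | b :: rest =>
      if f == b || PySem.Str.startswith f (b ++ "_") then some b else pvFindBase f rest

def extract_base_feature_ohe (f : String) (bases_sorted : List String) (feature_to_category : List (String × String)) : String :=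
  match pvFindBase f bases_sorted with
  | some b => b
  | none =>
      if (PySem.Dict.ofList feature_to_category).contains f then f
      else f

-- ===== PORT B =====
-- the 'for i, b in enumerate(bases_sorted): if b not in idx: idx[b] = i' loop
def pvBuildIdx : Nat → List String → PySem.Dict String Nat → PySem.Dict String Nat
  | _, [], d => d
  | i, b :: rest, d =>
      pvBuildIdx (i + 1) rest (if (d.get? b).isSome then d else d.insert b i)

-- '[f] + [f[:i] for i, ch in enumerate(f) if ch == "_"]'; f[:i] with 0 ≤ i ≤ len f is take i (exact here)
def pvCandidates (f : String) : List String :=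
  f :: (PySem.List.enumerate f.toList 0).filterMap
    (fun p => if p.2 = '_' then some (String.ofList (f.toList.take p.1.toNat)) else none)

def extract_base_feature_ohe_alt (f : String) (bases_sorted : List String) (feature_to_category : List (String × String)) : String :=
  let idx := pvBuildIdx 0 bases_sorted PySem.Dict.empty
  let hits := (pvCandidates f).filterMap (fun c => idx.get? c)
  match PySem.List.min? hits (fun x => x) with
  | some j => (bases_sorted[j]?).getD f   -- bases_sorted[min(hits)]; the index is always in range, getD is a totality guard
  | none => f

-- ===== PRECONDITION & SPEC =====
def Spec_extract_base_feature_ohe (f : String) (bases_sorted : List String) (feature_to_category : List (String × String)) (out : String) : Prop := out = extract_base_feature_ohe_alt f bases_sorted feature_to_category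
instance (f : String) (bases_sorted : List String) (feature_to_category : List (String × String)) (out : String) : Decidable (Spec_extract_base_feature_ohe f bases_sorted feature_to_category out) := by unfold Spec_extract_base_feature_ohe; infer_instance

-- ===== CLAIM (what is proved, stated in full; the proofs are below) =====
def Claim_equal_extract_base_feature_ohe : Prop := ∀ (f : String) (bases_sorted : List String) (feature_to_category : List (String × String)), Dom_extract_base_feature_ohe f bases_sorted feature_to_category → Spec_extract_base_feature_ohe f bases_sorted feature_to_category (extract_base_feature_ohe f bases_sorted feature_to_category)

-- ===== LEMMAS AND PROOFS =====

-- find? returns the element at the least index satisfying p.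
theorem pv_find?_of_least {α : Type} (p : α → Bool) (l : List α) (j : Nat) (hj : j < l.length)
    (hp : p (l[j]'hj) = true) (hmin : ∀ i (h : i < j), p (l[i]'(Nat.lt_trans h hj)) = false) :
    l.find? p = some (l[j]'hj) := by
  induction l generalizing j with
  | nil => simp at hj
  | cons a t ih =>
    cases j with
    | zero => simp only [List.getElem_cons_zero] at hp ⊢; simp [List.find?_cons_of_pos, hp]
    | succ k =>
      have h0 : p a = false := hmin 0 (Nat.succ_pos k)
      rw [List.find?_cons_of_neg (by simp [h0])]
      simp only [List.getElem_cons_succ] at hp ⊢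
      exact ih k (by simpa using hj) hp (fun i h => hmin (i+1) (by omega))

-- B's dict maps c to (first index of c in l) + i, unless c is already in d.
theorem pv_buildIdx_get? (l : List String) (i : Nat) (d : PySem.Dict String Nat) (c : String) :
    (pvBuildIdx i l d).get? c = (d.get? c).or ((PySem.List.index? l c).map (· + i)) := by
  induction l generalizing i d with
  | nil => simp [pvBuildIdx, PySem.List.index?_eq_idxOf?]
  | cons b rest ih =>
    rw [pvBuildIdx, ih]
    simp only [PySem.List.index?_eq_idxOf?, List.idxOf?_cons]
    have harith : ∀ o : Option Nat, (o.map (· + (i+1))) = ((o.map (· + 1)).map (· + i)) := by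
      intro o; cases o with
      | none => rfl
      | some k => simp; omega
    cases hd : d.get? b with
    | some v =>
      rw [if_pos (by simp [hd])]
      by_cases hbc : b = c
      · subst hbc; simp [hd]
      · rw [if_neg (by simpa using hbc)]
        simp [harith]
    | none =>
      rw [if_neg (by simp [hd])]
      by_cases hbc : b = c
      · subst hbc
        rw [if_pos (by simp)]
        simp [PySem.Dict.get?_insert, hd]
      · rw [if_neg (by simpa using hbc), PySem.Dict.get?_insert, if_neg (fun h => hbc h.symm)]
        simp [harith]

theorem pv_drop_eq (F : List Char) (k : Nat) (h : k < F.length) :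
    F.take k ++ F[k] :: F.drop (k+1) = F := by
  rw [← List.drop_eq_getElem_cons h, List.take_append_drop]

-- A's test succeeds on b exactly when b is one of B's candidate strings.
theorem pv_cond_iff (f b : String) :
    (f == b || PySem.Str.startswith f (b ++ "_")) = true ↔ b ∈ pvCandidates f := by
  rw [Bool.or_eq_true, beq_iff_eq]
  have hsw : PySem.Str.startswith f (b ++ "_") = true ↔ b.toList ++ ['_'] <+: f.toList := by
    have : (b ++ "_").toList = b.toList ++ ['_'] := by simp
    rw [show PySem.Str.startswith f (b ++ "_") = PySem.Chars.startswith f.toList (b ++ "_").toList from by simp,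
        PySem.Chars.startswith_iff, this]
  rw [hsw]
  simp only [pvCandidates, List.mem_cons, List.mem_filterMap, PySem.List.mem_enumerate_iff]
  constructor
  · rintro (hfb | ⟨t, ht⟩)
    · exact Or.inl hfb.symm
    · refine Or.inr ?_
      have ht' : b.toList ++ '_' :: t = f.toList := by simpa using ht
      have hlen : b.toList.length < f.toList.length := by
        have := congrArg List.length ht'
        simp only [List.length_append, List.length_cons] at this
        omega
      refine ⟨((0 : Int) + (b.toList.length : Int), f.toList[b.toList.length]'hlen), ⟨b.toList.length, hlen, rfl⟩, ?_⟩
      have hget : f.toList[b.toList.length]'hlen = '_' := by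
        have h2 : f.toList[b.toList.length]? = some '_' := by
          rw [← ht', List.getElem?_append_right (Nat.le_refl _)]
          simp
        rw [List.getElem?_eq_getElem hlen] at h2
        exact Option.some.inj h2
      have htake : f.toList.take b.toList.length = b.toList := by
        rw [← ht, List.append_assoc, List.take_append_of_le_length (le_refl _)]
        simp
      simp only [hget, if_pos rfl]
      congr 1
      rw [show ((0 : Int) + (b.toList.length : Int)).toNat = b.toList.length by omega, htake]
      simp
  · rintro (hfb | ⟨⟨i, c⟩, ⟨k, hk, hpk⟩, hg⟩)
    · exact Or.inl hfb.symm
    · refine Or.inr ?_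
      obtain ⟨hi, hc⟩ : i = (0 : Int) + (k : Int) ∧ c = f.toList[k]'hk :=
        ⟨congrArg Prod.fst hpk, congrArg Prod.snd hpk⟩
      subst hi hc
      by_cases hus : f.toList[k]'hk = '_'
      · rw [if_pos hus] at hg
        have hb : b.toList = f.toList.take k := by
          have := congrArg String.toList (Option.some.inj hg)
          simpa [show ((0:Int)+(k:Int)).toNat = k by omega] using this.symm
        refine ⟨f.toList.drop (k+1), ?_⟩
        rw [hb]
        calc (f.toList.take k ++ ['_']) ++ f.toList.drop (k+1)
            = f.toList.take k ++ '_' :: f.toList.drop (k+1) := by simp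
          _ = f.toList.take k ++ f.toList[k]'hk :: f.toList.drop (k+1) := by rw [hus]
          _ = f.toList := pv_drop_eq _ _ hk
      · rw [if_neg hus] at hg; exact absurd hg (by simp)

-- the loop of A is List.find? on its test
theorem pv_findBase_eq (f : String) (l : List String) :
    pvFindBase f l = l.find? (fun b => f == b || PySem.Str.startswith f (b ++ "_")) := by
  induction l with
  | nil => rfl
  | cons b rest ih =>
    cases hc : (f == b || PySem.Str.startswith f (b ++ "_")) with
    | true => rw [pvFindBase, if_pos hc, List.find?_cons, hc]
    | false => rw [pvFindBase, if_neg (by rw [hc]; exact Bool.false_ne_true), List.find?_cons, hc, ih]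

theorem pv_pred_eq (f : String) :
    (fun b => f == b || PySem.Str.startswith f (b ++ "_")) = (fun b => decide (b ∈ pvCandidates f)) := by
  funext b
  by_cases h : b ∈ pvCandidates f
  · rw [(pv_cond_iff f b).mpr h]; simp [h]
  · have hf : ¬ ((f == b || PySem.Str.startswith f (b ++ "_")) = true) :=
      fun hc => h ((pv_cond_iff f b).mp hc)
    simp only [Bool.not_eq_true] at hf
    rw [hf]; simp [h]

-- core equality: first match in bases vs minimal first-index over the candidates
theorem pv_main (f : String) (bases : List String) :
    (match bases.find? (fun b => decide (b ∈ pvCandidates f)) with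
     | some b => b
     | none => f)
    = (match PySem.List.min? ((pvCandidates f).filterMap fun c => PySem.List.index? bases c) (fun x => x) with
       | some j => (bases[j]?).getD f
       | none => f) := by
  cases hm : PySem.List.min? ((pvCandidates f).filterMap fun c => PySem.List.index? bases c) (fun x => x) with
  | none =>
    have hnil : ((pvCandidates f).filterMap fun c => PySem.List.index? bases c) = [] :=
      (PySem.List.min?_eq_none_iff _ _).mp hm
    have hfind : bases.find? (fun b => decide (b ∈ pvCandidates f)) = none := by
      rw [List.find?_eq_none]
      intro x hx
      simp only [decide_eq_true_eq]
      intro hxc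
      have := List.filterMap_eq_nil_iff.mp hnil x hxc
      exact ((PySem.List.index?_eq_none_iff _ _).mp this) hx
    rw [hfind]
  | some j =>
    have hjmem : j ∈ (pvCandidates f).filterMap fun c => PySem.List.index? bases c :=
      PySem.List.min?_mem hm
    obtain ⟨c, hcmem, hidx⟩ := List.mem_filterMap.mp hjmem
    obtain ⟨hj, hgetj, _⟩ := PySem.List.getElem_of_index?_eq_some hidx
    have hgetj? : bases[j]? = some c := by
      rw [List.getElem?_eq_getElem hj, hgetj]
    have hp : (fun b => decide (b ∈ pvCandidates f)) (bases[j]'hj) = true := by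
      simp [hgetj, hcmem]
    have hmin : ∀ i (h : i < j), (fun b => decide (b ∈ pvCandidates f)) (bases[i]'(Nat.lt_trans h hj)) = false := by
      intro i hi
      by_contra hcon
      simp only [Bool.not_eq_false, decide_eq_true_eq] at hcon
      have hmemb : bases[i]'(Nat.lt_trans hi hj) ∈ bases := List.getElem_mem _
      obtain ⟨j', hj'⟩ := Option.isSome_iff_exists.mp ((PySem.List.index?_isSome_iff _ _).mpr hmemb)
      have hj'mem : j' ∈ (pvCandidates f).filterMap fun c => PySem.List.index? bases c :=
        List.mem_filterMap.mpr ⟨_, hcon, hj'⟩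
      have hle : j ≤ j' := PySem.List.min?_isMin hm j' hj'mem
      obtain ⟨hj'lt, _, hprev'⟩ := PySem.List.getElem_of_index?_eq_some hj'
      have hj'le : j' ≤ i := by
        by_contra hgt
        exact hprev' i (Nat.lt_of_not_le hgt) rfl
      omega
    rw [pv_find?_of_least _ bases j hj hp hmin]
    simp only [hgetj]
    rw [hgetj?]
    rfl

-- ===== VERDICT (by name: the statement is the Claim_ definition above) =====
theorem extract_base_feature_ohe_spec : Claim_equal_extract_base_feature_ohe := by
  intro f bases fc _
  unfold Spec_extract_base_feature_ohe extract_base_feature_ohe extract_base_feature_ohe_alt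
  rw [pv_findBase_eq, pv_pred_eq]
  have hhits : ((pvCandidates f).filterMap fun c => (pvBuildIdx 0 bases PySem.Dict.empty).get? c)
      = (pvCandidates f).filterMap fun c => PySem.List.index? bases c := by
    congr 1
    funext c
    rw [pv_buildIdx_get?]
    cases h : PySem.List.index? bases c <;> simp [h, PySem.Dict.get?_empty]
  simp only [hhits, ite_self]
  exact pv_main f bases
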